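-- pv_equiv track=rewrite | github.com/SREENIVASAN-PRASANTH/CODING-PRACTICE | python DSA/The_richest_person.py | get_persons_dict
-- ===== SOURCE A (Python) =====
-- def get_formatted_name(name):
--     name = "".join(name.split())
--     name = name.lower()
--     return name
--
-- def get_persons_dict(names_list, incomes_list):
--     persons_dict = dict()
--     for i in range(len(names_list)):
--         name = get_formatted_name(names_list[i])
--         if name not in persons_dict.keys():
--             persons_dict[name] = incomes_list[i]
--         else:
--             persons_dict[name] += incomes_list[i]
--     return persons_dict
-- ===== SOURCE B (Python) =====
-- def get_persons_dict(names_list, incomes_list):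
--     pairs = [("".join(n.split()).lower(), v) for n, v in zip(names_list, incomes_list)]
--     groups = {}
--     for k, v in pairs:
--         groups.setdefault(k, []).append(v)
--     return {k: sum(vs) for k, vs in groups.items()}
-- ===== Notes on version B (the rewrite author's own statement) =====
-- stated objective: alternative
-- what changed: B is collect-then-reduce: it builds the (normalized name, income) pair list with zip, groups each name's incomes into a list via setdefault, and sums each group in a final comprehension, instead of A's index loop maintaining running totals behind a membership branch.
import Mathlib
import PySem

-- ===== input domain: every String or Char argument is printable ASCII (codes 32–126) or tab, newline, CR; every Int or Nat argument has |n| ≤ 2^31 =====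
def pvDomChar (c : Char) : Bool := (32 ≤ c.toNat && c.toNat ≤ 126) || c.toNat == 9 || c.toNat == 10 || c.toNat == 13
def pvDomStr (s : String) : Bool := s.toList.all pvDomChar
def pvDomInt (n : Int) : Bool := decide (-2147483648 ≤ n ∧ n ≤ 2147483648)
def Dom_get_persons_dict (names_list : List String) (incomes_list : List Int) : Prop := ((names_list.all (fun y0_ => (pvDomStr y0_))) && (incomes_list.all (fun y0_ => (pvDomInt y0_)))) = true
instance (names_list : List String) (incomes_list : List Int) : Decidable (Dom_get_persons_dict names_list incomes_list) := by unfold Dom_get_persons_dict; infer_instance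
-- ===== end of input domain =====

-- B is collect-then-reduce: zip pairs, group each name's incomes into a list, then sum each group (alternative decomposition, same results); Pre_ excludes the length mismatch on which A raises IndexError.


-- ===== PORT A =====
def get_formatted_name (name : String) : String :=
  PySem.Str.lower (PySem.Str.join "" (PySem.Str.split₀ name))

def get_persons_dict (names_list : List String) (incomes_list : List Int) : List (String × Int) :=
  ((PySem.List.pyRange 0 (names_list.length : Int) 1).foldl (fun d i =>
      let name := get_formatted_name (PySem.List.pyGetD names_list i "")
      if !(d.contains name) then d.insert name (PySem.List.pyGetD incomes_list i 0)
      else d.modify name 0 (· + PySem.List.pyGetD incomes_list i 0))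
    PySem.Dict.empty).items

-- ===== PORT B =====
def get_persons_dict_alt (names_list : List String) (incomes_list : List Int) : List (String × Int) :=
  let pairs := (names_list.zip incomes_list).map
    (fun p => (PySem.Str.lower (PySem.Str.join "" (PySem.Str.split₀ p.1)), p.2))
  let groups := pairs.foldl (fun d p => d.modify p.1 [] (· ++ [p.2])) PySem.Dict.empty
  groups.items.map (fun g => (g.1, g.2.sum))

-- ===== PRECONDITION & SPEC =====
-- Pre_ excludes exactly the inputs on which A raises IndexError (incomes_list shorter than names_list).
def Pre_get_persons_dict (names_list : List String) (incomes_list : List Int) : Prop :=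
  names_list.length ≤ incomes_list.length
instance (names_list : List String) (incomes_list : List Int) : Decidable (Pre_get_persons_dict names_list incomes_list) := by unfold Pre_get_persons_dict; infer_instance
def pvWitness_get_persons_dict : List String × List Int := (["Al i", "ALI"], [3, 4])

def Spec_get_persons_dict (names_list : List String) (incomes_list : List Int) (out : List (String × Int)) : Prop := out = get_persons_dict_alt names_list incomes_list
instance (names_list : List String) (incomes_list : List Int) (out : List (String × Int)) : Decidable (Spec_get_persons_dict names_list incomes_list out) := by unfold Spec_get_persons_dict; infer_instance

-- ===== CLAIM (what is proved, stated in full; the proofs are below) =====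
def Claim_equal_get_persons_dict : Prop := ∀ (names_list : List String) (incomes_list : List Int), Dom_get_persons_dict names_list incomes_list → Pre_get_persons_dict names_list incomes_list → Spec_get_persons_dict names_list incomes_list (get_persons_dict names_list incomes_list)

-- ===== LEMMAS AND PROOFS =====

-- A's loop body, at the level of an already-formatted (name, income) pair.
def pvStep (d : PySem.Dict String Int) (p : String × Int) : PySem.Dict String Int :=
  if !(d.contains p.1) then d.insert p.1 p.2 else d.modify p.1 0 (· + p.2)

-- B's grouped-sum result for a pair list.
def pvCanon (L : List (String × Int)) : List (String × Int) :=
  (PySem.List.dedup (L.map Prod.fst)).map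
    (fun k => (k, ((L.filter (fun p => p.1 == k)).map Prod.snd).sum))

theorem pvDedup_append (xs : List String) (k : String) :
    PySem.List.dedup (xs ++ [k]) = if k ∈ xs then PySem.List.dedup xs else PySem.List.dedup xs ++ [k] := by
  rw [PySem.List.dedup_eq_ofList, PySem.List.dedup_eq_ofList,
      PySem.Set.ofList_eq_foldl, PySem.Set.ofList_eq_foldl, List.foldl_append]
  show PySem.Set.add _ k = _
  rw [PySem.Set.add]
  have : (List.foldl PySem.Set.add [] xs).contains k = decide (k ∈ xs) := by
    rw [PySem.Set.contains]
    rw [← PySem.Set.ofList_eq_foldl]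
    simp [PySem.Set.mem_ofList]
  rw [this]
  by_cases h : k ∈ xs <;> simp [h]

-- B's grouping-loop body and its result: each key of the pair list mapped to its income list.
def pvGStep (d : PySem.Dict String (List Int)) (p : String × Int) : PySem.Dict String (List Int) :=
  d.modify p.1 [] (· ++ [p.2])

def pvGroups (L : List (String × Int)) : List (String × List Int) :=
  (PySem.List.dedup (L.map Prod.fst)).map
    (fun k => (k, (L.filter (fun p => p.1 == k)).map Prod.snd))

-- Loop invariant: after folding A's per-pair step over any pair list, the dict's items are the grouped sums.
theorem pvFold_eq_canon (L : List (String × Int)) :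
    (L.foldl pvStep PySem.Dict.empty).items = pvCanon L := by
  induction L using List.reverseRecOn with
  | nil => rfl
  | append_singleton M x ih =>
    rw [List.foldl_append]
    set d := M.foldl pvStep PySem.Dict.empty with hd
    obtain ⟨k, v⟩ := x
    have hkeys : d.keys = PySem.List.dedup (M.map Prod.fst) := by
      show d.items.map (·.1) = _
      rw [ih]; simp only [pvCanon, List.map_map, Function.comp_def]; simp
    have hnodup : d.keys.Nodup := by rw [hkeys]; exact PySem.List.nodup_dedup _
    have hc : d.contains k = decide (k ∈ M.map Prod.fst) := by
      rw [PySem.Dict.contains_eq_decide_mem_keys, hkeys]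
      simp [PySem.Set.mem_ofList]
    by_cases hk : k ∈ M.map Prod.fst
    · -- key already present: A's '+=' is an in-place overwrite with the old running sum plus v
      have hS : d.getD k 0 = ((M.filter (fun p => p.1 == k)).map Prod.snd).sum := by
        apply PySem.Dict.getD_of_mem_items _ _ hnodup
        rw [ih]
        simp only [pvCanon]
        exact List.mem_map.mpr ⟨k, by simp [PySem.Set.mem_ofList, hk]⟩
      have hstep : pvStep d (k, v) = d.insert k (((M.filter (fun p => p.1 == k)).map Prod.snd).sum + v) := by
        simp [pvStep, hc, hk, PySem.Dict.modify, hS]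
      rw [List.foldl_cons, List.foldl_nil, hstep, PySem.Dict.items_insert_of_contains d _ (by simp [hc, hk]), ih]
      simp only [pvCanon, List.map_append, List.map_cons, List.map_nil, List.filter_append]
      rw [pvDedup_append, if_pos hk]
      simp only [List.map_map]
      apply List.map_congr_left
      intro c hc'
      by_cases hck : c = k
      · subst hck; simp
      · simp [Function.comp, hck, Ne.symm hck]
    · -- new key: both sides append the new entry at the end
      have hstep : pvStep d (k, v) = d.insert k v := by simp [pvStep, hc, hk]
      rw [List.foldl_cons, List.foldl_nil, hstep, PySem.Dict.items_insert_of_not_contains d _ (by simp [hc, hk]), ih]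
      have hfilnil : M.filter (fun p => p.1 == k) = [] := by
        rw [List.filter_eq_nil_iff]
        intro p hp
        simp only [beq_iff_eq]
        exact fun h => hk (h ▸ List.mem_map_of_mem hp)
      simp only [pvCanon, List.map_append, List.map_cons, List.map_nil, List.filter_append]
      rw [pvDedup_append, if_neg hk, List.map_append]
      congr 1
      · apply List.map_congr_left
        intro c hc'
        have hck : c ≠ k := by
          intro h; subst h
          exact hk (by simpa [PySem.Set.mem_ofList] using hc')
        simp [Ne.symm hck]
      · simp [hfilnil]

-- Loop invariant for B's grouping pass: the groups dict's items list each key's incomes in order.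
theorem pvGroupFold (L : List (String × Int)) :
    (L.foldl pvGStep PySem.Dict.empty).items = pvGroups L := by
  induction L using List.reverseRecOn with
  | nil => rfl
  | append_singleton M x ih =>
    rw [List.foldl_append]
    set d := M.foldl pvGStep PySem.Dict.empty with hd
    obtain ⟨k, v⟩ := x
    have hkeys : d.keys = PySem.List.dedup (M.map Prod.fst) := by
      show d.items.map (·.1) = _
      rw [ih]; simp only [pvGroups, List.map_map, Function.comp_def]; simp
    have hnodup : d.keys.Nodup := by rw [hkeys]; exact PySem.List.nodup_dedup _
    have hc : d.contains k = decide (k ∈ M.map Prod.fst) := by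
      rw [PySem.Dict.contains_eq_decide_mem_keys, hkeys]
      simp [PySem.Set.mem_ofList]
    have hstep : pvGStep d (k, v) = d.insert k (d.getD k [] ++ [v]) := rfl
    by_cases hk : k ∈ M.map Prod.fst
    · have hS : d.getD k [] = (M.filter (fun p => p.1 == k)).map Prod.snd := by
        apply PySem.Dict.getD_of_mem_items _ _ hnodup
        rw [ih]
        simp only [pvGroups]
        exact List.mem_map.mpr ⟨k, by simp [PySem.Set.mem_ofList, hk]⟩
      rw [List.foldl_cons, List.foldl_nil, hstep, hS,
          PySem.Dict.items_insert_of_contains d _ (by simp [hc, hk]), ih]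
      simp only [pvGroups, List.map_append, List.map_cons, List.map_nil, List.filter_append]
      rw [pvDedup_append, if_pos hk]
      simp only [List.map_map]
      apply List.map_congr_left
      intro c hc'
      by_cases hck : c = k
      · subst hck; simp
      · simp [Function.comp, hck, Ne.symm hck]
    · have hgd : d.getD k [] = [] :=
        PySem.Dict.getD_of_not_contains d _ (by simp [hc, hk])
      rw [List.foldl_cons, List.foldl_nil, hstep, hgd,
          PySem.Dict.items_insert_of_not_contains d _ (by simp [hc, hk]), ih]
      have hfilnil : M.filter (fun p => p.1 == k) = [] := by
        rw [List.filter_eq_nil_iff]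
        intro p hp
        simp only [beq_iff_eq]
        exact fun h => hk (h ▸ List.mem_map_of_mem hp)
      simp only [pvGroups, List.map_append, List.map_cons, List.map_nil, List.filter_append]
      rw [pvDedup_append, if_neg hk, List.map_append]
      congr 1
      · apply List.map_congr_left
        intro c hc'
        have hck : c ≠ k := by
          intro h; subst h
          exact hk (by simpa [PySem.Set.mem_ofList] using hc')
        simp [Ne.symm hck]
      · simp [hfilnil]

-- B's port, rewritten through the grouping invariant, is the grouped-sum list.
theorem pvAlt_eq (names_list : List String) (incomes_list : List Int) :
    get_persons_dict_alt names_list incomes_list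
      = pvCanon ((names_list.zip incomes_list).map (fun p => (get_formatted_name p.1, p.2))) := by
  show (((names_list.zip incomes_list).map (fun p => (get_formatted_name p.1, p.2))).foldl
      pvGStep PySem.Dict.empty).items.map (fun g => (g.1, g.2.sum)) = _
  rw [pvGroupFold]
  simp [pvCanon, pvGroups, List.map_map]

-- Under Pre_, A's index loop over range(len(names_list)) is the fold of pvStep over the formatted zip pairs.
theorem pvA_eq_zip_fold (names_list : List String) (incomes_list : List Int)
    (h : names_list.length ≤ incomes_list.length) :
    get_persons_dict names_list incomes_list =
      (((names_list.zip incomes_list).map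
          (fun p => (get_formatted_name p.1, p.2))).foldl pvStep PySem.Dict.empty).items := by
  unfold get_persons_dict
  rw [PySem.List.pyRange_zero_natCast, List.foldl_map, List.foldl_map]
  have hz : names_list.zip incomes_list
      = (List.range names_list.length).map (fun k => (names_list.getD k "", incomes_list.getD k 0)) := by
    apply List.ext_getElem
    · simp [List.length_zip]; omega
    · intro i h1 h2
      simp at h1 h2 ⊢
      constructor
      · rw [List.getElem?_eq_getElem h2]; rfl
      · rw [List.getElem?_eq_getElem (show i < incomes_list.length by omega)]; rfl
  rw [hz, List.foldl_map]
  refine congrArg PySem.Dict.items ?_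
  apply PySem.List.foldl_congr_mem
  intro d k _
  simp [pvStep, PySem.List.pyGetD_natCast]

-- ===== VERDICT (by name: the statement is the Claim_ definition above) =====
theorem get_persons_dict_spec : Claim_equal_get_persons_dict := by
  intro names incomes _ hpre
  unfold Spec_get_persons_dict
  rw [pvA_eq_zip_fold names incomes hpre, pvFold_eq_canon, pvAlt_eq]
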